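-- pv_equiv track=rewrite | github.com/Cole-Graham/warno-actual | src/constants/weapons/__init__.py | precompute_circular_references
-- ===== SOURCE A (Python) =====
-- from typing import Dict, Any, Union, List, Tuple, Set
--
-- def precompute_circular_references(dependencies: Dict[str, Set[str]]) -> Set[str]:
--     """Precompute which weapons have circular references."""
--     circular_weapons = set()
--
--     def has_cycle(weapon: str, visited: Set[str], rec_stack: Set[str]) -> bool:
--         visited.add(weapon)
--         rec_stack.add(weapon)
--
--         for dep in dependencies.get(weapon, set()):
--             if dep not in visited:
--                 if has_cycle(dep, visited, rec_stack):
--                     return True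
--             elif dep in rec_stack:
--                 circular_weapons.add(weapon)
--                 return True
--
--         rec_stack.remove(weapon)
--         return False
--
--     for weapon in dependencies:
--         if weapon not in circular_weapons:
--             has_cycle(weapon, set(), set())
--
--     return circular_weapons
-- ===== SOURCE B (Python) =====
-- def precompute_circular_references(dependencies):
--     """Precompute which weapons have circular references (iterative DFS with an explicit frame stack)."""
--     circular_weapons = set()
--     for root in dependencies:
--         if root in circular_weapons:
--             continue
--         visited = {root}
--         rec_stack = {root}
--         stack = [(root, iter(dependencies.get(root, set())))]
--         while stack:
--             weapon, it = stack[-1]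
--             dep = next(it, None)
--             if dep is None:
--                 rec_stack.discard(weapon)
--                 stack.pop()
--             elif dep not in visited:
--                 visited.add(dep)
--                 rec_stack.add(dep)
--                 stack.append((dep, iter(dependencies.get(dep, set()))))
--             elif dep in rec_stack:
--                 circular_weapons.add(weapon)
--                 stack.clear()
--     return circular_weapons
-- ===== Notes on version B (the rewrite author's own statement) =====
-- stated objective: alternative
-- what changed: The recursive nested has_cycle DFS is replaced by an iterative DFS over an explicit stack of (weapon, dependency-iterator) frames with per-root seeding, the first back-edge aborting the root's traversal by clearing the stack.
import Mathlib
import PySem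

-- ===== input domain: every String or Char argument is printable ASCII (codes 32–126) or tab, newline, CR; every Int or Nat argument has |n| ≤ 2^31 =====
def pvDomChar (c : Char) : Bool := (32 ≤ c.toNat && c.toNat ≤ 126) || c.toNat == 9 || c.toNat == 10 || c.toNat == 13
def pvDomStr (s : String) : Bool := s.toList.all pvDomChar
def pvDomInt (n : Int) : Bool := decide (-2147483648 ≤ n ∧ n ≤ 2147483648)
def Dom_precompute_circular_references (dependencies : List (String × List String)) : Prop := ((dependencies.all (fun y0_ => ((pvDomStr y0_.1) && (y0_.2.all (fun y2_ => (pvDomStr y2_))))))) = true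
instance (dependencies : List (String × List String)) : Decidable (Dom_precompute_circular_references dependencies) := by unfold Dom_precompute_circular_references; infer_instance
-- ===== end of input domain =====

-- B rewrites A's recursive nested-function DFS as an iterative DFS over an explicit stack of
-- (weapon, remaining-deps) frames (objective: alternative decomposition, same circular set).
-- Note: in Python A iterates over dict VALUES that are sets; A and B iterate them in the same
-- (hash) order within one process, and both ports iterate the given lists in list order.

-- ===== PORT A =====
-- dependencies.get(w, set()) — first-match lookup in the association list
def pvDeps (dependencies : List (String × List String)) (w : String) : List String :=
  (PySem.Dict.mk dependencies).getD w []

-- fuel bounding the recursion DEPTH of has_cycle: each nested call adds a fresh node to `visited`,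
-- all of which come from the finitely many strings of `dependencies`, so depth never exceeds this.
def pvFuel (dependencies : List (String × List String)) : Nat :=
  dependencies.foldl (fun n p => n + 1 + p.2.length) 0 + 1

-- the `for dep in dependencies.get(weapon, set())` loop body of has_cycle, followed by
-- rec_stack.remove(weapon); `hc` is the recursive call at one fuel less (passed in so the
-- recursion is structural). `discard` = Python's `remove` here: weapon was added on entry
-- and only deeper (distinct) nodes remove themselves.
def pvLoopA
    (hc : String → PySem.Set String → PySem.Set String → PySem.Set String →
      Option (Bool × PySem.Set String × PySem.Set String × PySem.Set String))
    (ds : List String) (weapon : String) (visited recStack circ : PySem.Set String) :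
    Option (Bool × PySem.Set String × PySem.Set String × PySem.Set String) :=
  match ds with
  | [] => some (false, visited, PySem.Set.discard recStack weapon, circ)
  | d :: rest =>
    if !(PySem.Set.contains visited d) then
      match hc d visited recStack circ with
      | none => none
      | some (found, v', r', c') =>
        if found then some (true, v', r', c')
        else pvLoopA hc rest weapon v' r' c'
    else if PySem.Set.contains recStack d then
      some (true, visited, recStack, PySem.Set.add circ weapon)
    else pvLoopA hc rest weapon visited recStack circ

-- has_cycle(weapon, visited, rec_stack); returns (result, visited, rec_stack, circular_weapons);
-- none = (never-reached) fuel exhaustion, the only totality guard.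
def pvHcA (dependencies : List (String × List String)) :
    Nat → String → PySem.Set String → PySem.Set String → PySem.Set String →
      Option (Bool × PySem.Set String × PySem.Set String × PySem.Set String)
  | 0, _, _, _, _ => none
  | f + 1, weapon, visited, recStack, circ =>
    pvLoopA (pvHcA dependencies f) (pvDeps dependencies weapon) weapon
      (PySem.Set.add visited weapon) (PySem.Set.add recStack weapon) circ

-- `for weapon in dependencies: if weapon not in circular_weapons: has_cycle(weapon, set(), set())`
def pvRootsA (dependencies : List (String × List String)) (keys : List String)
    (circ : PySem.Set String) : PySem.Set String :=
  match keys with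
  | [] => circ
  | w :: ks =>
    if PySem.Set.contains circ w then pvRootsA dependencies ks circ
    else
      match pvHcA dependencies (pvFuel dependencies) w PySem.Set.empty PySem.Set.empty circ with
      | none => pvRootsA dependencies ks circ
      | some (_, _, _, c') => pvRootsA dependencies ks c'

def precompute_circular_references (dependencies : List (String × List String)) : List String :=
  pvRootsA dependencies (PySem.Dict.mk dependencies).keys PySem.Set.empty

-- ===== PORT B =====
-- step-count bookkeeping for B's while-loop (totality only): each machine step strictly
-- decreases this weight of the stack, so seeding the step fuel above it makes pvRunB total.
def pvBase (dependencies : List (String × List String)) : Nat :=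
  2 + (dependencies.map (fun p => p.2.length)).sum

def pvMeasure (dependencies : List (String × List String))
    (stack : List (Nat × String × List String)) : Nat :=
  stack.foldr (fun f acc => (1 + f.2.2.length) * (pvBase dependencies) ^ f.1 + acc) 0

-- the `while stack:` loop; a frame is (depth fuel, weapon, remaining deps of its iterator);
-- the frame's depth fuel is the same depth bound as A's and sf is a step counter making the
-- recursion structural; neither ever runs out on a real run.
def pvRunB (dependencies : List (String × List String)) :
    Nat → List (Nat × String × List String) →
      PySem.Set String → PySem.Set String → PySem.Set String → Option (PySem.Set String)
  | 0, _, _, _, _ => none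
  | sf + 1, stack, visited, recStack, circ =>
    match stack with
    | [] => some circ
    | (df, w, ds) :: rest =>
      match ds with
      | [] =>
        -- iterator exhausted: rec_stack.discard(weapon); stack.pop()
        pvRunB dependencies sf rest visited (PySem.Set.discard recStack w) circ
      | d :: ds' =>
        if !(PySem.Set.contains visited d) then
          match df with
          | 0 => none
          | df' + 1 =>
            pvRunB dependencies sf
              ((df', d, pvDeps dependencies d) :: (df' + 1, w, ds') :: rest)
              (PySem.Set.add visited d) (PySem.Set.add recStack d) circ
        else if PySem.Set.contains recStack d then
          -- circular_weapons.add(weapon); stack.clear()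
          some (PySem.Set.add circ w)
        else pvRunB dependencies sf ((df, w, ds') :: rest) visited recStack circ

-- `for root in dependencies:` — skip roots already known circular, else run the machine from a fresh seed
def pvRootsB (dependencies : List (String × List String)) (keys : List String)
    (circ : PySem.Set String) : PySem.Set String :=
  match keys with
  | [] => circ
  | w :: ks =>
    if PySem.Set.contains circ w then pvRootsB dependencies ks circ
    else
      match pvRunB dependencies
          (pvMeasure dependencies [(pvFuel dependencies - 1, w, pvDeps dependencies w)] + 1)
          [(pvFuel dependencies - 1, w, pvDeps dependencies w)]
          (PySem.Set.add PySem.Set.empty w) (PySem.Set.add PySem.Set.empty w) circ with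
      | none => pvRootsB dependencies ks circ
      | some c' => pvRootsB dependencies ks c'

def precompute_circular_references_alt (dependencies : List (String × List String)) : List String :=
  pvRootsB dependencies (PySem.Dict.mk dependencies).keys PySem.Set.empty

-- ===== PRECONDITION & SPEC =====
def Spec_precompute_circular_references (dependencies : List (String × List String)) (out : List String) : Prop := out = precompute_circular_references_alt dependencies
instance (dependencies : List (String × List String)) (out : List String) : Decidable (Spec_precompute_circular_references dependencies out) := by unfold Spec_precompute_circular_references; infer_instance

-- ===== CLAIM (what is proved, stated in full; the proofs are below) =====
def Claim_equal_precompute_circular_references : Prop := ∀ (dependencies : List (String × List String)), Dom_precompute_circular_references dependencies → Spec_precompute_circular_references dependencies (precompute_circular_references dependencies)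

-- ===== LEMMAS AND PROOFS =====

lemma pvDeps_cases (dependencies : List (String × List String)) (d : String) :
    pvDeps dependencies d = [] ∨ pvDeps dependencies d ∈ dependencies.map (fun p => p.2) := by
  unfold pvDeps
  induction dependencies with
  | nil => left; simp [PySem.Dict.getD, PySem.Dict.get?]
  | cons p ps ih =>
    rw [PySem.Dict.getD_eq_get?_getD, PySem.Dict.get?_mk_cons]
    by_cases h : p.1 == d
    · simp [h]
    · rw [PySem.Dict.getD_eq_get?_getD] at ih
      simp only [h]
      rcases ih with h1 | h1
      · left; simpa using h1
      · right; simp; right; simpa using h1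

lemma pvDeps_len_lt (dependencies : List (String × List String)) (d : String) :
    (pvDeps dependencies d).length + 1 < pvBase dependencies := by
  rcases pvDeps_cases dependencies d with h | h
  · simp [h, pvBase]; omega
  · have hm : (pvDeps dependencies d).length ∈ (dependencies.map (fun p => p.2.length)) := by
      simpa using (List.mem_map_of_mem (f := List.length) h)
    have := List.single_le_sum (l := dependencies.map (fun p => p.2.length)) (fun x _ => Nat.zero_le x) _ hm
    simp [pvBase]; omega

-- the three step inequalities of the machine's weight
lemma pvMu_pop (dependencies : List (String × List String)) (df : Nat) (w : String)
    (rest : List (Nat × String × List String)) :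
    pvMeasure dependencies rest < pvMeasure dependencies ((df, w, []) :: rest) := by
  simp only [pvMeasure, List.foldr_cons, List.length_nil]
  have : 0 < pvBase dependencies ^ df := Nat.pow_pos (by simp [pvBase])
  omega

lemma pvMu_adv (dependencies : List (String × List String)) (df : Nat) (w d : String)
    (ds' : List String) (rest : List (Nat × String × List String)) :
    pvMeasure dependencies ((df, w, ds') :: rest)
      < pvMeasure dependencies ((df, w, d :: ds') :: rest) := by
  simp only [pvMeasure, List.foldr_cons, List.length_cons]
  have hp : 0 < pvBase dependencies ^ df := Nat.pow_pos (by simp [pvBase])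
  have h2 : (1 + (ds'.length + 1)) * pvBase dependencies ^ df
      = pvBase dependencies ^ df + (1 + ds'.length) * pvBase dependencies ^ df := by
    ring
  omega

lemma pvMu_push (dependencies : List (String × List String)) (df' : Nat) (w d : String)
    (ds' : List String) (rest : List (Nat × String × List String)) :
    pvMeasure dependencies ((df', d, pvDeps dependencies d) :: (df' + 1, w, ds') :: rest)
      < pvMeasure dependencies ((df' + 1, w, d :: ds') :: rest) := by
  simp only [pvMeasure, List.foldr_cons, List.length_cons]
  have hp : 0 < pvBase dependencies ^ df' := Nat.pow_pos (by simp [pvBase])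
  have h1 : (1 + (pvDeps dependencies d).length) * pvBase dependencies ^ df'
      < pvBase dependencies ^ (df' + 1) := by
    rw [pow_succ']
    exact Nat.mul_lt_mul_of_lt_of_le (by have := pvDeps_len_lt dependencies d; omega)
      (le_refl _) hp
  have h2 : (1 + (ds'.length + 1)) * pvBase dependencies ^ (df' + 1)
      = pvBase dependencies ^ (df' + 1) + (1 + ds'.length) * pvBase dependencies ^ (df' + 1) := by
    ring
  omega

-- proof-side model of the machine without the step counter (recursion on the weight)
def pvRunBW (dependencies : List (String × List String))
    (stack : List (Nat × String × List String))
    (visited recStack circ : PySem.Set String) : Option (PySem.Set String) :=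
  match stack with
  | [] => some circ
  | (df, w, ds) :: rest =>
    match ds with
    | [] => pvRunBW dependencies rest visited (PySem.Set.discard recStack w) circ
    | d :: ds' =>
      if !(PySem.Set.contains visited d) then
        match df with
        | 0 => none
        | df' + 1 =>
          pvRunBW dependencies ((df', d, pvDeps dependencies d) :: (df' + 1, w, ds') :: rest)
            (PySem.Set.add visited d) (PySem.Set.add recStack d) circ
      else if PySem.Set.contains recStack d then some (PySem.Set.add circ w)
      else pvRunBW dependencies ((df, w, ds') :: rest) visited recStack circ
  termination_by pvMeasure dependencies stack
  decreasing_by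
    · exact pvMu_pop dependencies df w rest
    · exact pvMu_push dependencies df' w d ds' rest
    · exact pvMu_adv dependencies df w d ds' rest

-- with enough step fuel the fueled machine is the machine
lemma pv_bridge (dependencies : List (String × List String)) :
    ∀ (sf : Nat) (stack : List (Nat × String × List String))
      (v r c : PySem.Set String), pvMeasure dependencies stack < sf →
      pvRunB dependencies sf stack v r c = pvRunBW dependencies stack v r c := by
  intro sf
  induction sf with
  | zero => intro stack v r c h; exact absurd h (Nat.not_lt_zero _)
  | succ sf ih =>
    intro stack v r c h
    match stack with
    | [] => rw [pvRunBW.eq_def]; rfl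
    | (df, w, ds) :: rest =>
      match ds with
      | [] =>
        conv_rhs => rw [pvRunBW.eq_def]
        exact ih rest v (PySem.Set.discard r w) c
          (by have := pvMu_pop dependencies df w rest; omega)
      | d :: ds' =>
        conv_rhs => rw [pvRunBW.eq_def]
        by_cases hv : d ∈ v
        · by_cases hr : d ∈ r
          · simp [pvRunB, hv, hr]
          · simp [pvRunB, hv, hr]
            exact ih ((df, w, ds') :: rest) v r c
              (by have := pvMu_adv dependencies df w d ds' rest; omega)
        · have hb : PySem.Set.contains v d = false := by
            simp [PySem.Set.contains_eq_listContains, hv]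
          simp only [pvRunB, hb, Bool.not_false, if_true]
          match df with
          | 0 => rfl
          | df' + 1 =>
            exact ih ((df', d, pvDeps dependencies d) :: (df' + 1, w, ds') :: rest)
              (PySem.Set.add v d) (PySem.Set.add r d) c
              (by have := pvMu_push dependencies df' w d ds' rest; omega)

lemma pvHcA_succ (dependencies : List (String × List String)) (f : Nat) (w : String)
    (v r c : PySem.Set String) :
    pvHcA dependencies (f + 1) w v r c
      = pvLoopA (pvHcA dependencies f) (pvDeps dependencies w) w
          (PySem.Set.add v w) (PySem.Set.add r w) c := rfl

-- one stack frame of B simulates one has_cycle call of A (same depth fuel, same states)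
lemma pv_frame (dependencies : List (String × List String)) :
    ∀ (df : Nat) (ds : List String) (w : String)
      (rest : List (Nat × String × List String)) (v r c : PySem.Set String),
      pvRunBW dependencies ((df, w, ds) :: rest) v r c =
        match pvLoopA (pvHcA dependencies df) ds w v r c with
        | none => none
        | some (found, v', r', c') =>
          if found then some c' else pvRunBW dependencies rest v' r' c' := by
  intro df
  induction df with
  | zero =>
    intro ds
    induction ds with
    | nil =>
      intro w rest v r c
      conv_lhs => rw [pvRunBW]
      conv_rhs => rw [pvLoopA]
      simp
    | cons d ds' ihds =>
      intro w rest v r c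
      conv_lhs => rw [pvRunBW]
      conv_rhs => rw [pvLoopA]
      by_cases hv : d ∈ v
      · by_cases hr : d ∈ r
        · simp [hv, hr]
        · simp [hv, hr]
          rw [ihds]
      · simp [pvHcA, hv]
  | succ df' ihdf =>
    intro ds
    induction ds with
    | nil =>
      intro w rest v r c
      conv_lhs => rw [pvRunBW]
      conv_rhs => rw [pvLoopA]
      simp
    | cons d ds' ihds =>
      intro w rest v r c
      conv_lhs => rw [pvRunBW]
      conv_rhs => rw [pvLoopA]
      by_cases hv : d ∈ v
      · by_cases hr : d ∈ r
        · simp [hv, hr]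
        · simp [hv, hr]
          rw [ihds]
      · rw [ihdf]
        rw [pvHcA_succ]
        cases h : pvLoopA (pvHcA dependencies df') (pvDeps dependencies d) d
            (PySem.Set.add v d) (PySem.Set.add r d) c with
        | none => simp [hv]
        | some res =>
          obtain ⟨b, v', r', c'⟩ := res
          cases b with
          | true => simp [hv]
          | false =>
            simp [hv]
            rw [ihds]

lemma pv_roots (dependencies : List (String × List String)) :
    ∀ (keys : List String) (circ : PySem.Set String),
      pvRootsA dependencies keys circ = pvRootsB dependencies keys circ := by
  intro keys
  induction keys with
  | nil =>
    intro circ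
    rw [pvRootsA, pvRootsB]
  | cons w ks ih =>
    intro circ
    conv_lhs => rw [pvRootsA]
    conv_rhs => rw [pvRootsB]
    by_cases hc : w ∈ circ
    · simp [hc, ih]
    · rw [pv_bridge dependencies _ _ _ _ _ (Nat.lt_succ_self _), pv_frame]
      have hf : pvFuel dependencies
          = dependencies.foldl (fun n p => n + 1 + p.2.length) 0 + 1 := rfl
      rw [hf]
      simp only [Nat.add_sub_cancel]
      rw [pvHcA_succ]
      cases h : pvLoopA
          (pvHcA dependencies (dependencies.foldl (fun n p => n + 1 + p.2.length) 0))
          (pvDeps dependencies w) w (PySem.Set.add PySem.Set.empty w)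
          (PySem.Set.add PySem.Set.empty w) circ with
      | none => simp [hc, ih]
      | some res =>
        obtain ⟨b, v', r', c'⟩ := res
        cases b with
        | true => simp [hc, ih]
        | false => simp [hc, ih, pvRunBW]

-- ===== VERDICT (by name: the statement is the Claim_ definition above) =====
theorem precompute_circular_references_spec : Claim_equal_precompute_circular_references := by
  intro dependencies _
  unfold Spec_precompute_circular_references precompute_circular_references precompute_circular_references_alt
  exact pv_roots dependencies _ _
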